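-- pv_equiv track=rewrite | github.com/bullet1337/codewars | katas/Python/6 kyu/Vowel Shifting 577e277c9fb2a5511c00001d.py | vowel_shift
-- ===== SOURCE A (Python) =====
-- def vowel_shift(text, n):
--     if not (text and n):
--         return text
--
--     indices = [i for i, l in enumerate(text.lower()) if l in 'aioue']
--     shifted = list(text)
--     for i in range(len(indices)):
--         shifted[indices[(i + n) % len(indices)]] = text[indices[i]]
--     return ''.join(shifted)
-- ===== SOURCE B (Python) =====
-- def vowel_shift(text, n):
--     if not (text and n):
--         return text
--     vowels = [c for c in text if c.lower() in 'aioue']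
--     L = len(vowels)
--     if L == 0:
--         return text
--     k = -n % L
--     rot = vowels[k:] + vowels[:k]
--     it = iter(rot)
--     return ''.join(next(it) if c.lower() in 'aioue' else c for c in text)
-- ===== Notes on version B (the rewrite author's own statement) =====
-- stated objective: simpler
-- what changed: Instead of computing a vowel-index list and scatter-writing each vowel to its target index via modular index arithmetic inside a loop, B collects the vowels, rotates the list once with two slices, and rebuilds the string in a single pass consuming the rotated vowels in order.
import Mathlib
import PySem

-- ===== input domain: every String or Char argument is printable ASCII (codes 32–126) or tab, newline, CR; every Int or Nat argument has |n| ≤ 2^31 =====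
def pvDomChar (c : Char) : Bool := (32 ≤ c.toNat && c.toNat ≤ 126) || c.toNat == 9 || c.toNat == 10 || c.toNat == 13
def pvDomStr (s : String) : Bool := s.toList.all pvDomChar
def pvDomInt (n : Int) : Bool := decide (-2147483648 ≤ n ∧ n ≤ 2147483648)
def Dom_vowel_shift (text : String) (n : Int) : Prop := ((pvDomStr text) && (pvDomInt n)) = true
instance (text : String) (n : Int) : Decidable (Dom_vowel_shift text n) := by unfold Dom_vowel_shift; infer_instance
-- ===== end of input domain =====

-- B replaces A's scatter-writes through a modular index table by: collect the vowels,
-- rotate that list once with two slices, and rebuild the string in one pass consuming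
-- the rotated vowels in order (objective: simpler).

-- ===== PORT A =====
def vowel_shift (text : String) (n : Int) : String :=
  -- if not (text and n): return text
  if text = "" ∨ n = 0 then text
  else
    let cs := text.toList
    -- indices = [i for i, l in enumerate(text.lower()) if l in 'aioue']
    -- ('l in "aioue"' with l a single character is exactly list membership)
    let indices := ((PySem.List.enumerate (PySem.Str.lower text).toList 0).filter
        (fun p => decide (p.2 ∈ ['a', 'i', 'o', 'u', 'e']))).map Prod.fst
    let L : Int := indices.length
    -- for i in range(len(indices)): shifted[indices[(i + n) % len(indices)]] = text[indices[i]]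
    -- (all indexing is in range, so the pyGetD/pySetD defaults are never used)
    let shifted := (PySem.List.pyRange 0 L 1).foldl
      (fun sh i =>
        PySem.List.pySetD sh (PySem.List.pyGetD indices (PySem.Int.mod (i + n) L) 0)
          (PySem.List.pyGetD cs (PySem.List.pyGetD indices i 0) ' ')) cs
    String.ofList shifted

-- ===== PORT B =====
-- c.lower() in 'aioue'
def vowelB (c : Char) : Bool := decide (PySem.Chars.lowerChar c ∈ ['a', 'i', 'o', 'u', 'e'])

-- ''.join(next(it) if c.lower() in 'aioue' else c for c in text): rebuild, pulling the
-- next rotated vowel at each vowel position (rot is never exhausted, one entry per vowel)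
def vsGo : List Char → List Char → List Char
  | [], _ => []
  | c :: cs, rot =>
    if vowelB c then
      match rot with
      | v :: rest => v :: vsGo cs rest
      | [] => c :: vsGo cs []
    else c :: vsGo cs rot

def vowel_shift_alt (text : String) (n : Int) : String :=
  if text = "" ∨ n = 0 then text
  else
    let cs := text.toList
    let vs := cs.filter vowelB
    if vs = [] then text
    else
      -- k = -n % L  (0 ≤ k < L, so toNat is exact and the two slices are take/drop)
      let k := (PySem.Int.mod (-n) (vs.length : Int)).toNat
      let rot := vs.drop k ++ vs.take k
      String.ofList (vsGo cs rot)

-- ===== PRECONDITION & SPEC =====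
def Spec_vowel_shift (text : String) (n : Int) (out : String) : Prop := out = vowel_shift_alt text n
instance (text : String) (n : Int) (out : String) : Decidable (Spec_vowel_shift text n out) := by unfold Spec_vowel_shift; infer_instance

-- ===== CLAIM (what is proved, stated in full; the proofs are below) =====
def Claim_equal_vowel_shift : Prop := ∀ (text : String) (n : Int), Dom_vowel_shift text n → Spec_vowel_shift text n (vowel_shift text n)

-- ===== LEMMAS AND PROOFS =====

-- positions (from offset s) of the vowels of a character list
def posN (s : Nat) : List Char → List Nat
  | [] => []
  | c :: cs => if vowelB c then s :: posN (s + 1) cs else posN (s + 1) cs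

theorem indices_eq (cs : List Char) : ∀ (sn : Nat),
    ((PySem.List.enumerate (PySem.Chars.lower cs) (sn : Int)).filter
        (fun p => decide (p.2 ∈ ['a', 'i', 'o', 'u', 'e']))).map Prod.fst
      = (posN sn cs).map (fun (m : Nat) => (m : Int)) := by
  induction cs with
  | nil => intro sn; simp [PySem.Chars.lower, posN]
  | cons c cs ih =>
    intro sn
    have hl : PySem.Chars.lower (c :: cs) = PySem.Chars.lowerChar c :: PySem.Chars.lower cs := rfl
    have hs : (sn : Int) + 1 = ((sn + 1 : Nat) : Int) := by push_cast; ring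
    rw [hl, PySem.List.enumerate_cons, hs, List.filter_cons]
    rw [show (decide (((sn : Int), PySem.Chars.lowerChar c).2 ∈ ['a', 'i', 'o', 'u', 'e'])) = vowelB c from rfl]
    by_cases hv : vowelB c
    · rw [if_pos hv, List.map_cons, ih (sn + 1),
        show posN sn (c :: cs) = sn :: posN (sn + 1) cs from by simp [posN, hv]]
      simp
    · rw [if_neg (by simpa [vowelB] using hv), ih (sn + 1),
        show posN sn (c :: cs) = posN (sn + 1) cs from by simp [posN, hv]]

theorem posN_mem (cs : List Char) : ∀ (s : Nat), ∀ x ∈ posN s cs, s ≤ x ∧ x < s + cs.length := by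
  induction cs with
  | nil => intro s x hx; simp [posN] at hx
  | cons c cs ih =>
    intro s x hx
    by_cases hv : vowelB c
    · simp only [posN, hv, if_pos, List.mem_cons] at hx
      rcases hx with rfl | hx
      · simp
      · have := ih (s + 1) x hx; simp only [List.length_cons]; omega
    · simp only [posN, hv, if_neg, Bool.false_eq_true, not_false_iff] at hx
      have := ih (s + 1) x hx; simp only [List.length_cons]; omega

theorem posN_pairwise (cs : List Char) : ∀ (s : Nat), (posN s cs).Pairwise (· < ·) := by
  induction cs with
  | nil => intro s; simp [posN]
  | cons c cs ih =>
    intro s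
    by_cases hv : vowelB c
    · simp only [posN, hv, if_pos]
      exact List.Pairwise.cons (fun x hx => by have := posN_mem cs (s + 1) x hx; omega) (ih (s + 1))
    · simpa [posN, hv] using ih (s + 1)

theorem posN_length (cs : List Char) : ∀ (s : Nat), (posN s cs).length = (cs.filter vowelB).length := by
  induction cs with
  | nil => intro s; simp [posN]
  | cons c cs ih =>
    intro s
    by_cases hv : vowelB c
    · simp [posN, hv, ih]
    · simp [posN, hv, ih]

theorem posN_getD (cs : List Char) : ∀ (pre : List Char) (d : Char),
    (posN pre.length cs).map (fun p => (pre ++ cs).getD p d) = cs.filter vowelB := by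
  induction cs with
  | nil => intro pre d; simp [posN]
  | cons c cs ih =>
    intro pre d
    have hmid : ∀ x, (pre ++ c :: cs).getD x d = ((pre ++ [c]) ++ cs).getD x d := by
      intro x; simp
    have hlen : pre.length + 1 = (pre ++ [c]).length := by simp
    by_cases hv : vowelB c
    · have hc : (pre ++ c :: cs).getD pre.length d = c := by
        rw [List.getD_eq_getElem _ _ (by simp)]
        simp
      rw [show posN pre.length (c :: cs) = pre.length :: posN (pre.length + 1) cs from by
            simp [posN, hv],
          List.map_cons, hc, List.filter_cons, if_pos hv]
      congr 1
      calc (posN (pre.length + 1) cs).map (fun p => (pre ++ c :: cs).getD p d)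
          = (posN (pre ++ [c]).length cs).map (fun p => ((pre ++ [c]) ++ cs).getD p d) := by
            rw [← hlen]; exact List.map_congr_left (fun x _ => hmid x)
        _ = cs.filter vowelB := ih (pre ++ [c]) d
    · rw [show posN pre.length (c :: cs) = posN (pre.length + 1) cs from by simp [posN, hv],
          List.filter_cons, if_neg (by simp [hv])]
      calc (posN (pre.length + 1) cs).map (fun p => (pre ++ c :: cs).getD p d)
          = (posN (pre ++ [c]).length cs).map (fun p => ((pre ++ [c]) ++ cs).getD p d) := by
            rw [← hlen]; exact List.map_congr_left (fun x _ => hmid x)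
        _ = cs.filter vowelB := ih (pre ++ [c]) d

theorem merge_lemma (cs : List Char) : ∀ (rot pre : List Char),
    rot.length = (cs.filter vowelB).length →
    List.foldl (fun sh (pr : Nat × Char) => sh.set pr.1 pr.2) (pre ++ cs)
        ((posN pre.length cs).zip rot)
      = pre ++ vsGo cs rot := by
  induction cs with
  | nil => intro rot pre _; simp [posN, vsGo]
  | cons c cs ih =>
    intro rot pre h
    by_cases hv : vowelB c
    · rw [List.filter_cons, if_pos hv] at h
      cases rot with
      | nil => simp at h
      | cons v rest =>
        have hrest : rest.length = (cs.filter vowelB).length := by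
          simpa using h
        have hset : (pre ++ c :: cs).set pre.length v = (pre ++ [v]) ++ cs := by
          rw [List.set_append]
          simp
        rw [show posN pre.length (c :: cs) = pre.length :: posN (pre.length + 1) cs from by
              simp [posN, hv],
            List.zip_cons_cons, List.foldl_cons, hset]
        have hlen : pre.length + 1 = (pre ++ [v]).length := by simp
        rw [hlen, ih rest (pre ++ [v]) hrest]
        simp [vsGo, hv]
    · rw [List.filter_cons, if_neg (by simp [hv])] at h
      rw [show posN pre.length (c :: cs) = posN (pre.length + 1) cs from by simp [posN, hv],
          show pre ++ c :: cs = (pre ++ [c]) ++ cs from by simp,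
          show pre.length + 1 = (pre ++ [c]).length from by simp,
          ih rot (pre ++ [c]) h]
      simp [vsGo, hv]

-- ===== VERDICT (by name: the statement is the Claim_ definition above) =====
theorem vowel_shift_spec : Claim_equal_vowel_shift := by
  unfold Claim_equal_vowel_shift Spec_vowel_shift vowel_shift vowel_shift_alt
  intro text n _
  by_cases hg : text = "" ∨ n = 0
  · simp [hg]
  · rw [if_neg hg, if_neg hg]
    have hidx0 := indices_eq text.toList 0
    simp only [Nat.cast_zero] at hidx0
    simp only [PySem.Str.toList_lower, hidx0, List.length_map]
    set cs := text.toList with hcsdef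
    set vs := List.filter vowelB cs with hvsdef
    set idx := posN 0 cs with hidxdef
    have hidxlen : idx.length = vs.length := by
      rw [hidxdef, hvsdef]; exact posN_length cs 0
    by_cases hempty : vs = []
    · have hidxnil : idx = [] := by
        apply List.eq_nil_of_length_eq_zero; rw [hidxlen, hempty]; rfl
      rw [if_pos hempty, hidxnil]
      simp only [List.length_nil, Nat.cast_zero]
      rw [show PySem.List.pyRange 0 0 1 = ([] : List Int) from by decide]
      simp [hcsdef]
    · rw [if_neg hempty, hidxlen]
      set Ln := vs.length with hLndef
      have hLpos : 0 < Ln := by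
        cases hv : vs with
        | nil => exact absurd hv hempty
        | cons a t => rw [hLndef, hv]; simp
      have h0 : (0 : Int) < (Ln : Int) := by exact_mod_cast hLpos
      have h0' : ((Ln : Int)) ≠ 0 := ne_of_gt h0
      simp only [PySem.Int.mod_eq_emod_of_pos h0]
      set kk := ((-n) % (Ln : Int)).toNat with hkkdef
      have hkklt : kk < Ln := by
        rw [hkkdef]; rw [Int.toNat_lt' hLpos]; exact Int.emod_lt_of_pos _ h0
      set rot := vs.drop kk ++ vs.take kk with hrotdef
      have hrotlen : rot.length = Ln := by
        rw [hrotdef]; simp; omega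
      have hidxlen' : idx.length = Ln := hidxlen
      -- elements of idx are valid positions in cs
      have hbound : ∀ j, j < Ln → idx.getD j 0 < cs.length := by
        intro j hj
        have hj' : j < idx.length := by omega
        rw [List.getD_eq_getElem idx 0 hj']
        have hmem : idx[j] ∈ idx := List.getElem_mem hj'
        have := posN_mem cs 0 idx[j] hmem
        omega
      have hnodup : idx.Nodup := by
        have := posN_pairwise cs 0
        rw [← hidxdef] at this
        exact this.imp (fun h => Nat.ne_of_lt h)
      -- the i-th vowel of cs, read off through idx
      have hgetvs : ∀ j, j < Ln → cs.getD (idx.getD j 0) ' ' = vs.getD j ' ' := by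
        intro j hj
        have hmap := posN_getD cs [] ' '
        simp only [List.length_nil, List.nil_append] at hmap
        rw [← hidxdef, ← hvsdef] at hmap
        have hj1 : j < idx.length := by omega
        rw [List.getD_eq_getElem idx 0 hj1, ← hmap,
          List.getD_eq_getElem (List.map (fun p => cs.getD p ' ') idx) ' '
            (by rw [List.length_map]; omega), List.getElem_map]
      -- modular cancellation: shifting by n then rotating by kk = -n % L is the identity
      have hcancel : ∀ k, k < Ln → (((( k : Int) + n) % (Ln : Int)).toNat + kk) % Ln = k := by
        intro k hk
        have e1 : (((((k : Int) + n) % (Ln : Int)).toNat : Int)) = ((k : Int) + n) % (Ln : Int) :=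
          Int.toNat_of_nonneg (Int.emod_nonneg _ h0')
        have e2 : ((kk : Int)) = (-n) % (Ln : Int) := by
          rw [hkkdef]; exact Int.toNat_of_nonneg (Int.emod_nonneg _ h0')
        have key : ((((((k : Int) + n) % (Ln : Int)).toNat + kk : Nat) % Ln : Nat) : Int) = (k : Int) := by
          push_cast [e1, e2]
          rw [← Int.add_emod]
          have : (k : Int) + n + -n = (k : Int) := by ring
          rw [this]
          exact Int.emod_eq_of_lt (by positivity) (by exact_mod_cast hk)
        exact_mod_cast key
      have hsiglt : ∀ k : Nat, ((((k : Int) + n) % (Ln : Int)).toNat) < Ln := by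
        intro k
        rw [Int.toNat_lt' hLpos]
        exact Int.emod_lt_of_pos _ h0
      -- rot, read positionally, is vs rotated left by kk
      have hrotgetD : ∀ m, m < Ln → rot.getD m ' ' = vs.getD ((m + kk) % Ln) ' ' := by
        intro m hm
        have hmod : (m + kk) % Ln < Ln := Nat.mod_lt _ hLpos
        show (vs.drop kk ++ vs.take kk).getD m ' ' = vs.getD ((m + kk) % Ln) ' '
        rw [List.getD_eq_getElem (vs.drop kk ++ vs.take kk) ' ' (by simp; omega),
          List.getD_eq_getElem vs ' ' (by omega)]
        by_cases hlt : m < Ln - kk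
        · have h1 : (m + kk) % Ln = kk + m := by
            rw [Nat.mod_eq_of_lt (by omega)]; omega
          simp only [h1]
          rw [List.getElem_append_left (by simp; omega)]
          simp only [List.getElem_drop]
        · have h1 : (m + kk) % Ln = m - (Ln - kk) := by
            rw [Nat.mod_eq_sub_mod (by omega), Nat.mod_eq_of_lt (by omega)]; omega
          simp only [h1]
          rw [List.getElem_append_right (by simp; omega)]
          simp only [List.getElem_take]
          congr 1
          simp [hLndef]
      -- the body of A's loop, in terms of Nat indexing
      have hstep : ∀ (sh : List Char), ∀ k ∈ List.range Ln,
          PySem.List.pySetD sh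
              (PySem.List.pyGetD (idx.map (fun (m : Nat) => (m : Int))) ((((k : Nat) : Int) + n) % (Ln : Int)) 0)
              (PySem.List.pyGetD cs (PySem.List.pyGetD (idx.map (fun (m : Nat) => (m : Int))) ((k : Nat) : Int) 0) ' ')
            = sh.set (idx.getD ((((k : Int) + n) % (Ln : Int)).toNat) 0) (vs.getD k ' ') := by
        intro sh k hk
        have hk' : k < Ln := List.mem_range.mp hk
        have hmapgetD : ∀ j : Nat, j < Ln →
            (idx.map (fun (m : Nat) => (m : Int))).getD j 0 = ((idx.getD j 0 : Nat) : Int) := by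
          intro j hj
          have hj1 : j < (idx.map (fun (m : Nat) => (m : Int))).length := by
            rw [List.length_map]; omega
          have hj2 : j < idx.length := by omega
          rw [List.getD_eq_getElem _ 0 hj1, List.getD_eq_getElem idx 0 hj2, List.getElem_map]
        have hnn : 0 ≤ ((k : Int) + n) % (Ln : Int) := Int.emod_nonneg _ h0'
        rw [PySem.List.pyGetD_of_nonneg _ _ hnn, hmapgetD _ (hsiglt k),
          PySem.List.pyGetD_natCast, hmapgetD k hk', PySem.List.pyGetD_natCast,
          PySem.List.pySetD_natCast, hgetvs k hk']
      -- rewrite A's loop into a fold over Nat indices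
      rw [show PySem.List.pyRange 0 (Ln : Int) 1 = (List.range Ln).map (fun k => ((k : Nat) : Int)) from by
            rw [PySem.List.pyRange_one]; norm_num,
          List.foldl_map]
      refine congrArg String.ofList ?_
      trans (List.foldl
          (fun (sh : List Char) (k : Nat) =>
            sh.set (idx.getD ((((k : Int) + n) % (Ln : Int)).toNat) 0) (vs.getD k ' '))
          cs (List.range Ln))
      · exact PySem.List.foldl_congr_mem _ _ _ _ hstep
      trans (List.foldl (fun (sh : List Char) (pr : Nat × Char) => sh.set pr.1 pr.2) cs
          ((List.range Ln).map
            (fun (k : Nat) => (idx.getD ((((k : Int) + n) % (Ln : Int)).toNat) 0, vs.getD k ' '))))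
      · exact (List.foldl_map
          (f := fun (k : Nat) => (idx.getD ((((k : Int) + n) % (Ln : Int)).toNat) 0, vs.getD k ' '))
          (g := fun (sh : List Char) (pr : Nat × Char) => sh.set pr.1 pr.2)
          (l := List.range Ln) (init := cs)).symm
      -- permute the writes into increasing-position order
      have hmapeq : (List.range Ln).map
            (fun (k : Nat) => (idx.getD ((((k : Int) + n) % (Ln : Int)).toNat) 0, vs.getD k ' '))
          = ((List.range Ln).map (fun (k : Nat) => (((k : Int) + n) % (Ln : Int)).toNat)).map
              (fun (m : Nat) => (idx.getD m 0, rot.getD m ' ')) := by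
        rw [List.map_map]
        apply List.map_congr_left
        intro k hk
        have hk' : k < Ln := List.mem_range.mp hk
        simp only [Function.comp]
        congr 1
        rw [hrotgetD _ (hsiglt k), hcancel k hk']
      have hperm : ((List.range Ln).map (fun (k : Nat) => (((k : Int) + n) % (Ln : Int)).toNat)).Perm
          (List.range Ln) := by
        have hnd : ((List.range Ln).map (fun (k : Nat) => (((k : Int) + n) % (Ln : Int)).toNat)).Nodup := by
          refine List.Nodup.map_on ?_ (List.nodup_range)
          intro a ha b hb hab
          have ha' := List.mem_range.mp ha
          have hb' := List.mem_range.mp hb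
          have h1 := hcancel a ha'
          have h2 := hcancel b hb'
          rw [hab] at h1
          omega
        rw [List.perm_ext_iff_of_nodup hnd List.nodup_range]
        intro m
        constructor
        · intro hm
          obtain ⟨k, _, rfl⟩ := List.mem_map.mp hm
          exact List.mem_range.mpr (hsiglt k)
        · intro hm
          have hm' := List.mem_range.mp hm
          have hklt : (((m : Int) - n) % (Ln : Int)).toNat < Ln := by
            rw [Int.toNat_lt' hLpos]; exact Int.emod_lt_of_pos _ h0
          refine List.mem_map.mpr ⟨(((m : Int) - n) % (Ln : Int)).toNat, List.mem_range.mpr hklt, ?_⟩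
          have key : (((((((m : Int) - n) % (Ln : Int)).toNat : Int)) + n) % (Ln : Int)) = ((m : Nat) : Int) := by
            rw [Int.toNat_of_nonneg (Int.emod_nonneg _ h0'), Int.emod_add_emod]
            have : (m : Int) - n + n = (m : Int) := by ring
            rw [this]
            exact Int.emod_eq_of_lt (by positivity) (by exact_mod_cast hm')
          show ((((((((m : Int) - n) % (Ln : Int)).toNat : Nat) : Int)) + n) % (Ln : Int)).toNat = m
          rw [key, Int.toNat_natCast]
      have hcomm : ∀ x ∈ ((List.range Ln).map (fun (k : Nat) => (((k : Int) + n) % (Ln : Int)).toNat)).map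
            (fun (m : Nat) => (idx.getD m 0, rot.getD m ' ')),
          ∀ y ∈ ((List.range Ln).map (fun (k : Nat) => (((k : Int) + n) % (Ln : Int)).toNat)).map
            (fun (m : Nat) => (idx.getD m 0, rot.getD m ' ')),
          ∀ z : List Char,
            ((fun (sh : List Char) (pr : Nat × Char) => sh.set pr.1 pr.2)
              ((fun (sh : List Char) (pr : Nat × Char) => sh.set pr.1 pr.2) z x) y)
          = ((fun (sh : List Char) (pr : Nat × Char) => sh.set pr.1 pr.2)
              ((fun (sh : List Char) (pr : Nat × Char) => sh.set pr.1 pr.2) z y) x) := by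
        intro x hx y hy z
        obtain ⟨m1, hm1, rfl⟩ := List.mem_map.mp hx
        obtain ⟨m2, hm2, rfl⟩ := List.mem_map.mp hy
        have hm1' : m1 < Ln := by
          obtain ⟨k, _, rfl⟩ := List.mem_map.mp hm1; exact hsiglt k
        have hm2' : m2 < Ln := by
          obtain ⟨k, _, rfl⟩ := List.mem_map.mp hm2; exact hsiglt k
        by_cases he : idx.getD m1 0 = idx.getD m2 0
        · have hm12 : m1 = m2 := by
            rw [List.getD_eq_getElem idx 0 (by omega : m1 < idx.length),
              List.getD_eq_getElem idx 0 (by omega : m2 < idx.length)] at he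
            exact (hnodup.getElem_inj_iff).mp he
          subst hm12
          rfl
        · exact List.set_comm _ _ he
      rw [hmapeq]
      trans (List.foldl (fun (sh : List Char) (pr : Nat × Char) => sh.set pr.1 pr.2) cs
          ((List.range Ln).map (fun (m : Nat) => (idx.getD m 0, rot.getD m ' '))))
      · exact List.Perm.foldl_eq' (List.Perm.map _ hperm) hcomm cs
      have hzip : (List.range Ln).map (fun (m : Nat) => (idx.getD m 0, rot.getD m ' ')) = idx.zip rot := by
        apply List.ext_getElem
        · simp [hidxlen', hrotlen]
        · intro i h1 h2
          have hi : i < Ln := by simpa using h1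
          simp only [List.getElem_map, List.getElem_range, List.getElem_zip]
          rw [List.getD_eq_getElem idx 0 (by omega), List.getD_eq_getElem rot ' ' (by omega)]
      rw [hzip]
      have hfit : rot.length = (cs.filter vowelB).length := by
        rw [hrotlen, ← hvsdef, hLndef]
      have := merge_lemma cs rot [] hfit
      simpa [← hidxdef] using this
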